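-- pv_equiv track=rewrite | github.com/danishmustafa86/Advent-Of-Code-2024 | Day 7/Problem 1/pro.py | find_solvable_equations
-- ===== SOURCE A (Python) =====
-- from itertools import product
--
-- def evaluate_equation(numbers, operators):
--     """
--     Evaluate the equation formed by inserting the operators into the numbers list.
--     """
--     expression = numbers[0]
--     for i in range(len(operators)):
--         if operators[i] == '+':
--             expression += numbers[i + 1]
--         elif operators[i] == '*':
--             expression *= numbers[i + 1]
--     return expression
--
-- def find_solvable_equations(equations):
--     """
--     Determine which equations can be made true by inserting + or * operators.
--     """
--     total_calibration = 0
--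
--     for test_value, numbers in equations:
--         num_positions = len(numbers) - 1
--         found_solution = False
--
--         # Generate all combinations of + and * operators for the given positions
--         for ops in product(['+', '*'], repeat=num_positions):
--             if evaluate_equation(numbers, ops) == test_value:
--                 total_calibration += test_value
--                 found_solution = True
--                 break
--
--     return total_calibration
-- ===== SOURCE B (Python) =====
-- def _reachable(target, rev):
--     # rev is the (nonempty) list of numbers in reverse order
--     if len(rev) == 1:
--         return target == rev[0]
--     n = rev[0]
--     rest = rev[1:]
--     if _reachable(target - n, rest):
--         return True
--     if n == 0:
--         return target == 0
--     return target % n == 0 and _reachable(target // n, rest)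
--
-- def find_solvable_equations(equations):
--     total_calibration = 0
--     for test_value, numbers in equations:
--         if _reachable(test_value, list(reversed(numbers))):
--             total_calibration += test_value
--     return total_calibration
-- ===== Notes on version B (the rewrite author's own statement) =====
-- stated objective: faster
-- what changed: Instead of enumerating all 2^(n-1) operator tuples per equation and re-evaluating each left-to-right, B runs a pruned backward recursion from the target over the reversed number list, inverting + by subtraction and * by exact division (only when the last number divides the target).
import Mathlib
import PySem

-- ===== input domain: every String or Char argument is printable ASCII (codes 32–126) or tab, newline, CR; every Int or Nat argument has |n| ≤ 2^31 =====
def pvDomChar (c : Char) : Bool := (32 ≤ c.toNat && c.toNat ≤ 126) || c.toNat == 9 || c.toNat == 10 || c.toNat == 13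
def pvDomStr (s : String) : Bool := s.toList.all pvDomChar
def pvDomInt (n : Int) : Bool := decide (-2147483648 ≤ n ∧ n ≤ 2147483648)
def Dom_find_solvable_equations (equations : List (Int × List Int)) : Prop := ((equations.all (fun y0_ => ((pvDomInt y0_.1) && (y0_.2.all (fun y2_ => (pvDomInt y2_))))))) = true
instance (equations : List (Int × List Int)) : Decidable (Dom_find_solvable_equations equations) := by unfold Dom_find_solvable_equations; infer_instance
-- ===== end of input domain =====

-- B replaces A's O(2^n)-operator-tuple enumeration per equation by a pruned backward
-- recursion from the target (subtract last number / divide when divisible); asymptotically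
-- faster in practice, exact same sum.

-- ===== PORT A =====
-- itertools.product(['+','*'], repeat=k), in Python's order (first slot varies slowest)
def prodPM : Nat → List (List Char)
  | 0 => [[]]
  | k+1 => (prodPM k).map (fun rest => '+' :: rest) ++ (prodPM k).map (fun rest => '*' :: rest)

def evaluate_equation (numbers : List Int) (operators : List Char) : Int :=
  let expression := (PySem.List.pyGet? numbers 0).getD 0   -- numbers[0]; none (IndexError) excluded by Pre_
  (List.range operators.length).foldl (fun expression i =>
    if operators.getD i ' ' == '+' then expression + (PySem.List.pyGet? numbers ((i : Int) + 1)).getD 0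
    else if operators.getD i ' ' == '*' then expression * (PySem.List.pyGet? numbers ((i : Int) + 1)).getD 0
    else expression) expression

def find_solvable_equations (equations : List (Int × List Int)) : Int :=
  equations.foldl (fun total_calibration eq =>
    let test_value := eq.1
    let numbers := eq.2
    let num_positions := numbers.length - 1
    -- for ops in product(...): if eval == test_value: add and break  ≡  any
    if (prodPM num_positions).any (fun ops => evaluate_equation numbers ops == test_value)
    then total_calibration + test_value
    else total_calibration) 0

-- ===== PORT B =====
-- rev is the numbers in reverse order; peel the last number: + is inverted by subtraction,
-- * by exact division (only when it divides; n = 0 multiplies everything to 0)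
def pvReachable (target : Int) (rev : List Int) : Bool :=
  match rev with
  | [] => false        -- Source B raises IndexError here; excluded by Pre_
  | [x] => target == x
  | n :: rest =>
    pvReachable (target - n) rest ||
    (if n == 0 then target == 0
     else PySem.Int.mod target n == 0 && pvReachable (PySem.Int.floordiv target n) rest)

def find_solvable_equations_alt (equations : List (Int × List Int)) : Int :=
  equations.foldl (fun total_calibration eq =>
    if pvReachable eq.1 eq.2.reverse then total_calibration + eq.1 else total_calibration) 0

-- ===== PRECONDITION & SPEC =====
-- Pre_ excludes equations with an empty numbers list: there A raises ValueError
-- (product(..., repeat=-1)) and B raises IndexError; neither returns.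
def Pre_find_solvable_equations (equations : List (Int × List Int)) : Prop :=
  ∀ p ∈ equations, p.2 ≠ []
instance (equations : List (Int × List Int)) : Decidable (Pre_find_solvable_equations equations) := by unfold Pre_find_solvable_equations; infer_instance
def pvWitness_find_solvable_equations : (List (Int × List Int)) := [(6, [2, 3]), (5, [2, 3]), (7, [7])]

def Spec_find_solvable_equations (equations : List (Int × List Int)) (out : Int) : Prop := out = find_solvable_equations_alt equations
instance (equations : List (Int × List Int)) (out : Int) : Decidable (Spec_find_solvable_equations equations out) := by unfold Spec_find_solvable_equations; infer_instance

-- ===== CLAIM (what is proved, stated in full; the proofs are below) =====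
def Claim_equal_find_solvable_equations : Prop := ∀ (equations : List (Int × List Int)), Dom_find_solvable_equations equations → Pre_find_solvable_equations equations → Spec_find_solvable_equations equations (find_solvable_equations equations)

-- ===== LEMMAS AND PROOFS =====

-- membership in the product list = right length and only '+'/'*'
theorem mem_prodPM {k : Nat} {ops : List Char} :
    ops ∈ prodPM k ↔ ops.length = k ∧ ∀ c ∈ ops, c = '+' ∨ c = '*' := by
  induction k generalizing ops with
  | zero =>
    simp [prodPM, List.length_eq_zero_iff]
    rintro rfl; simp
  | succ k ih =>
    simp only [prodPM, List.mem_append, List.mem_map]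
    constructor
    · rintro (⟨rest, hr, rfl⟩ | ⟨rest, hr, rfl⟩) <;>
      · obtain ⟨hl, hpm⟩ := ih.1 hr
        refine ⟨by simp [hl], ?_⟩
        intro c hc
        rcases List.mem_cons.mp hc with rfl | hc
        · simp
        · exact hpm c hc
    · rintro ⟨hlen, hpm⟩
      match ops, hlen with
      | c :: rest, hlen =>
        have hrest : rest ∈ prodPM k :=
          ih.2 ⟨by simpa using hlen, fun d hd => hpm d (List.mem_cons_of_mem _ hd)⟩
        rcases hpm c (by simp) with rfl | rfl
        · exact Or.inl ⟨rest, hrest, rfl⟩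
        · exact Or.inr ⟨rest, hrest, rfl⟩

theorem prodPM_ne_nil (k : Nat) : ∃ ops, ops ∈ prodPM k ∧ True := by
  refine ⟨List.replicate k '+', mem_prodPM.2 ⟨by simp, ?_⟩, trivial⟩
  intro c hc; exact Or.inl (List.eq_of_mem_replicate hc)

-- evaluating after appending one more number and one more operator
theorem eval_snoc (ys : List Int) (x n : Int) (ops : List Char) (o : Char)
    (hlen : ops.length = ys.length) :
    evaluate_equation (x :: (ys ++ [n])) (ops ++ [o]) =
      (if o == '+' then evaluate_equation (x :: ys) ops + n
       else if o == '*' then evaluate_equation (x :: ys) ops * n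
       else evaluate_equation (x :: ys) ops) := by
  unfold evaluate_equation
  have hget0 : (PySem.List.pyGet? (x :: (ys ++ [n])) 0).getD 0 = (PySem.List.pyGet? (x :: ys) 0).getD 0 := by
    simp [PySem.List.pyGet?_zero_cons]
  rw [List.length_append, List.length_singleton, List.range_succ, List.foldl_append]
  have hcongr :
      (List.range ops.length).foldl (fun expression i =>
        if (ops ++ [o]).getD i ' ' == '+' then expression + (PySem.List.pyGet? (x :: (ys ++ [n])) ((i : Int) + 1)).getD 0
        else if (ops ++ [o]).getD i ' ' == '*' then expression * (PySem.List.pyGet? (x :: (ys ++ [n])) ((i : Int) + 1)).getD 0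
        else expression) ((PySem.List.pyGet? (x :: (ys ++ [n])) 0).getD 0)
      = (List.range ops.length).foldl (fun expression i =>
        if ops.getD i ' ' == '+' then expression + (PySem.List.pyGet? (x :: ys) ((i : Int) + 1)).getD 0
        else if ops.getD i ' ' == '*' then expression * (PySem.List.pyGet? (x :: ys) ((i : Int) + 1)).getD 0
        else expression) ((PySem.List.pyGet? (x :: ys) 0).getD 0) := by
    rw [hget0]
    apply PySem.List.foldl_congr_mem
    intro acc i hi
    have hi' : i < ops.length := List.mem_range.mp hi
    have hops : (ops ++ [o]).getD i ' ' = ops.getD i ' ' := List.getD_append _ _ _ _ hi'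
    have hnum : PySem.List.pyGet? (x :: (ys ++ [n])) ((i : Int) + 1) = PySem.List.pyGet? (x :: ys) ((i : Int) + 1) := by
      have h1 : ((i : Int) + 1) = ((i + 1 : Nat) : Int) := by push_cast; ring
      rw [h1, PySem.List.pyGet?_natCast, PySem.List.pyGet?_natCast]
      have : x :: (ys ++ [n]) = (x :: ys) ++ [n] := by simp
      rw [this, List.getElem?_append_left (by simpa using Nat.succ_lt_succ (hlen ▸ hi'))]
    rw [hops, hnum]
  rw [hcongr]
  -- last step: index ops.length
  have hoplast : (ops ++ [o]).getD ops.length ' ' = o := by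
    rw [List.getD_append_right _ _ _ _ (le_refl _)]
    simp
  have hnlast : (PySem.List.pyGet? (x :: (ys ++ [n])) ((ops.length : Int) + 1)).getD 0 = n := by
    have h1 : ((ops.length : Int) + 1) = ((ops.length + 1 : Nat) : Int) := by push_cast; ring
    rw [h1, PySem.List.pyGet?_natCast]
    have h2 : x :: (ys ++ [n]) = (x :: ys) ++ [n] := by simp
    have h3 : ops.length + 1 = (x :: ys).length := by simp [hlen]
    rw [h2, h3, List.getElem?_concat_length]
    rfl
  simp only [List.foldl_cons, List.foldl_nil, hoplast, hnlast]

-- exact inversion of multiplication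
theorem mul_eq_iff_divides (v n t : Int) (hn : n ≠ 0) :
    v * n = t ↔ (PySem.Int.mod t n = 0 ∧ v = PySem.Int.floordiv t n) := by
  constructor
  · rintro rfl
    have hd : PySem.Int.mod (v * n) n = 0 := (PySem.Int.mod_eq_zero_iff_dvd _ _).2 ⟨v, by ring⟩
    refine ⟨hd, ?_⟩
    have := PySem.Int.floordiv_mul_add_mod (v * n) n
    rw [hd, add_zero] at this
    exact (mul_right_cancel₀ hn this.symm)
  · rintro ⟨hm, rfl⟩
    have := PySem.Int.floordiv_mul_add_mod t n
    rw [hm, add_zero] at this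
    exact this

-- core equivalence: some operator assignment evaluates to t  ↔  backward search succeeds
theorem reach_iff (rs : List Int) (x t : Int) :
    (∃ ops, ops.length = rs.length ∧ (∀ c ∈ ops, c = '+' ∨ c = '*') ∧
      evaluate_equation (x :: rs.reverse) ops = t)
    ↔ pvReachable t (rs ++ [x]) = true := by
  induction rs generalizing t with
  | nil =>
    constructor
    · rintro ⟨ops, hlen, -, hev⟩
      rw [List.length_eq_zero_iff.mp hlen] at hev
      simp only [List.reverse_nil] at hev
      have hx : x = t := by simpa [evaluate_equation] using hev
      simp [pvReachable, hx]
    · intro h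
      have hx : t = x := by simpa [pvReachable] using h
      exact ⟨[], rfl, by simp, by simp [evaluate_equation, hx]⟩
  | cons n rest ih =>
    have hsplit :
        (∃ ops, ops.length = (n :: rest).length ∧ (∀ c ∈ ops, c = '+' ∨ c = '*') ∧
          evaluate_equation (x :: (n :: rest).reverse) ops = t)
        ↔ ((∃ ops', ops'.length = rest.length ∧ (∀ c ∈ ops', c = '+' ∨ c = '*') ∧
              evaluate_equation (x :: rest.reverse) ops' = t - n)
           ∨ (∃ ops', ops'.length = rest.length ∧ (∀ c ∈ ops', c = '+' ∨ c = '*') ∧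
              evaluate_equation (x :: rest.reverse) ops' * n = t)) := by
      constructor
      · rintro ⟨ops, hlen, hpm, hev⟩
        have hne : ops ≠ [] := by
          intro h; rw [h] at hlen; simp at hlen
        obtain ⟨ops', o, rfl⟩ : ∃ l' b, ops = l' ++ [b] := by
          rcases List.eq_nil_or_concat ops with rfl | ⟨l', b, hc⟩
          · exact absurd rfl hne
          · exact ⟨l', b, by simpa [List.concat_eq_append] using hc⟩
        have hlen' : ops'.length = rest.length := by simpa using hlen
        have hpm' : ∀ c ∈ ops', c = '+' ∨ c = '*' := fun c hc => hpm c (by simp [hc])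
        rw [List.reverse_cons, eval_snoc rest.reverse x n ops' o (by simpa using hlen')] at hev
        rcases hpm o (by simp) with rfl | rfl
        · left; exact ⟨ops', hlen', hpm', by simp at hev; omega⟩
        · right; exact ⟨ops', hlen', hpm', by simpa using hev⟩
      · rintro (⟨ops', hlen', hpm', hev⟩ | ⟨ops', hlen', hpm', hev⟩)
        · refine ⟨ops' ++ ['+'], by simp [hlen'], ?_, ?_⟩
          · intro c hc; rcases List.mem_append.mp hc with hc | hc
            · exact hpm' c hc
            · simp at hc; simp [hc]
          · rw [List.reverse_cons, eval_snoc rest.reverse x n ops' '+' (by simpa using hlen')]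
            simp only [beq_self_eq_true, if_true, hev]
            omega
        · refine ⟨ops' ++ ['*'], by simp [hlen'], ?_, ?_⟩
          · intro c hc; rcases List.mem_append.mp hc with hc | hc
            · exact hpm' c hc
            · simp at hc; simp [hc]
          · rw [List.reverse_cons, eval_snoc rest.reverse x n ops' '*' (by simpa using hlen')]
            simp [hev]
    rw [hsplit]
    have hrhs : pvReachable t ((n :: rest) ++ [x]) =
        (pvReachable (t - n) (rest ++ [x]) ||
         (if n == 0 then t == 0
          else PySem.Int.mod t n == 0 && pvReachable (PySem.Int.floordiv t n) (rest ++ [x]))) := by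
      cases rest <;> rfl
    rw [hrhs]
    simp only [Bool.or_eq_true]
    constructor
    · rintro (h | h)
      · exact Or.inl ((ih (t - n)).1 h)
      · right
        obtain ⟨ops', hlen', hpm', hev⟩ := h
        by_cases hn : n = 0
        · subst hn
          simp only [beq_self_eq_true, if_true]
          simp at hev
          simp [← hev]
        · rw [if_neg (by simpa using hn)]
          obtain ⟨hm, hv⟩ := (mul_eq_iff_divides _ n t hn).1 hev
          simp only [hm, beq_self_eq_true, Bool.true_and]
          exact (ih (PySem.Int.floordiv t n)).1 ⟨ops', hlen', hpm', hv⟩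
    · rintro (h | h)
      · exact Or.inl ((ih (t - n)).2 h)
      · right
        by_cases hn : n = 0
        · subst hn
          rw [if_pos (by simp)] at h
          have ht : t = 0 := by simpa using h
          obtain ⟨ops, hmem, -⟩ := prodPM_ne_nil rest.length
          obtain ⟨hlen, hpm⟩ := mem_prodPM.1 hmem
          exact ⟨ops, hlen, hpm, by simp [ht]⟩
        · rw [if_neg (by simpa using hn)] at h
          simp only [Bool.and_eq_true, beq_iff_eq] at h
          obtain ⟨hm, hr⟩ := h
          obtain ⟨ops', hlen', hpm', hev⟩ := (ih (PySem.Int.floordiv t n)).2 hr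
          exact ⟨ops', hlen', hpm', (mul_eq_iff_divides _ n t hn).2 ⟨hm, hev⟩⟩

-- per-equation Bool equality
theorem cond_eq (t : Int) (numbers : List Int) (hne : numbers ≠ []) :
    ((prodPM (numbers.length - 1)).any (fun ops => evaluate_equation numbers ops == t))
      = pvReachable t numbers.reverse := by
  obtain ⟨x, ys, rfl⟩ := List.exists_cons_of_ne_nil hne
  rw [Bool.eq_iff_iff]
  have hlen : (x :: ys).length - 1 = ys.reverse.length := by simp
  rw [hlen, List.any_eq_true]
  have hrev : (x :: ys).reverse = ys.reverse ++ [x] := by simp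
  rw [hrev]
  have hys : (ys.reverse).reverse = ys := by simp
  constructor
  · rintro ⟨ops, hmem, hev⟩
    obtain ⟨hl, hpm⟩ := mem_prodPM.1 hmem
    exact (reach_iff ys.reverse x t).1 ⟨ops, hl, hpm, by rw [hys] at *; exact beq_iff_eq.mp hev⟩
  · intro h
    obtain ⟨ops, hl, hpm, hev⟩ := (reach_iff ys.reverse x t).2 h
    exact ⟨ops, mem_prodPM.2 ⟨hl, hpm⟩, by rw [hys] at hev; simp [hev]⟩

-- ===== VERDICT (by name: the statement is the Claim_ definition above) =====
theorem find_solvable_equations_spec : Claim_equal_find_solvable_equations := by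
  intro equations _ hpre
  unfold Spec_find_solvable_equations find_solvable_equations find_solvable_equations_alt
  apply PySem.List.foldl_congr_mem
  intro acc p hp
  dsimp only
  rw [cond_eq p.1 p.2 (hpre p hp)]
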